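-- pv_equiv track=rewrite | github.com/eclipse-iottestware/iottestware.fuzzing | src/utils/type_conversion.py | bytestring2octstring
-- ===== SOURCE A (Python) =====
-- def bytestring2octstring(bytestring):
--     """
--     Convert a bytearray represented as a string (coming e.g. from CLI) into a octetstring
--     :param bytes_string:
--     :return:
--     """
--     bytes_string = bytestring.lstrip('b')
--     octetstring = "'"
--
--     index = 0
--
--     while index < len(bytes_string):
--         c = bytes_string[index]
--
--         if c == '\\':
--             # if a byte is encoded as something like \x00
--             c_1 = bytes_string[index + 2]   # skip x and get first number
--             c_2 = bytes_string[index + 3]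
--             octetstring += '{}{}'.format(c_1, c_2)
--             index += 4
--         else:
--             # if a byte is encoded as a single character
--             e = str(hex(ord(c))).lstrip('0x')
--             octetstring += e
--             index += 1
--
--     return octetstring.upper() + "'O"
-- ===== SOURCE B (Python) =====
-- def bytestring2octstring(bytestring):
--     s = bytestring.lstrip('b')
--
--     def go(t):
--         p = t.find('\\')
--         if p < 0:
--             return [format(ord(c), 'x') for c in t]
--         return [format(ord(c), 'x') for c in t[:p]] + [t[p + 2] + t[p + 3]] + go(t[p + 4:])
--
--     return ("'" + ''.join(go(s))).upper() + "'O"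
-- ===== Notes on version B (the rewrite author's own statement) =====
-- stated objective: alternative
-- what changed: B replaces A's char-by-char indexed while loop (hex()/lstrip per character) by a recursion that locates the next escape with str.find, converts each whole literal run in bulk via format(ord(c), 'x') and joins the collected pieces once.
-- outside the precondition, e.g. on bytestring2octstring('\\xA\\'): A returns "'A\\'O", B returns "'A\\'O"; on bytestring2octstring('ab\\'): A raises IndexError, B raises IndexError
import Mathlib
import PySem

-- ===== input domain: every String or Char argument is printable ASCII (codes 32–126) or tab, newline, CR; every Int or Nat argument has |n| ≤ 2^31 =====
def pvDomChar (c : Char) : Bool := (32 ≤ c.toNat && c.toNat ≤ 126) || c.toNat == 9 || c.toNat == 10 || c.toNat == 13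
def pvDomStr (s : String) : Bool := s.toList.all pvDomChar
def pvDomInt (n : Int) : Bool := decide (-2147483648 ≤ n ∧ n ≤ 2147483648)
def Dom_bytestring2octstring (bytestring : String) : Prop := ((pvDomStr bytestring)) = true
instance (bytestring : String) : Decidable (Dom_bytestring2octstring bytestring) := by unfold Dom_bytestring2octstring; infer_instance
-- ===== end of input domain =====

-- B replaces A's char-by-char indexed while loop by a recursion that splits the string at the
-- next escape located by str.find and converts each literal run in bulk (objective: alternative).

-- ===== PORT A =====
-- hexCharL / hexRev: hand port of the digits of hex(n) (lowercase, most significant last in hexRev)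
def hexCharL (n : Nat) : Char := if n < 10 then Char.ofNat (48 + n) else Char.ofNat (87 + n)

def hexRev (n : Nat) : List Char :=
  if n = 0 then [] else hexCharL (n % 16) :: hexRev (n / 16)
decreasing_by exact Nat.div_lt_self (Nat.pos_of_ne_zero (by assumption)) (by norm_num)

-- str(hex(ord(c))): "0x" followed by the hex digits ('0' for 0) — exact
def pyHex (n : Nat) : List Char :=
  '0' :: 'x' :: (if n = 0 then ['0'] else (hexRev n).reverse)

-- str(hex(ord(c))).lstrip('0x'): drop every leading '0' or 'x' — exact
def eA (c : Char) : List Char :=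
  (pyHex c.toNat).dropWhile (fun d => d == '0' || d == 'x')

-- the while loop of A: index runs over the stripped list, acc is octetstring's tail (after the "'")
def loopA (l : List Char) (index : Nat) (acc : List Char) : List Char :=
  if h : index < l.length then
    let c := l[index]
    if c == '\\' then
      match l[index + 2]?, l[index + 3]? with
      | some c1, some c2 => loopA l (index + 4) (acc ++ [c1, c2])
      | _, _ => acc      -- Python raises IndexError here; such inputs are outside Pre_
    else
      loopA l (index + 1) (acc ++ eA c)
  else acc
termination_by l.length - index
decreasing_by all_goals omega

def bytestring2octstring (bytestring : String) : String :=
  -- bytestring.lstrip('b') = drop the leading 'b's — exact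
  String.ofList (PySem.Chars.upper
    ('\'' :: loopA (bytestring.toList.dropWhile (fun c => c == 'b')) 0 []) ++ ['\'', 'O'])

-- ===== PORT B =====
-- format(ord(c), 'x'): lowercase hex digits, no prefix — exact
def fB (c : Char) : List Char :=
  if c.toNat = 0 then ['0'] else (hexRev c.toNat).reverse

theorem findIdx?_some_lt {α : Type} (f : α → Bool) :
    ∀ (t : List α) (p : Nat), t.findIdx? f = some p → p < t.length := by
  intro t
  induction t with
  | nil => intro p h; rw [List.findIdx?_nil] at h; cases h
  | cons a t ih =>
      intro p h
      rw [List.findIdx?_cons] at h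
      by_cases hf : f a
      · rw [if_pos hf] at h
        injection h with h
        simp only [List.length_cons]; omega
      · rw [if_neg hf] at h
        obtain ⟨q, hq, rfl⟩ := Option.map_eq_some_iff.mp h
        have := ih q hq
        simp only [List.length_cons]; omega

-- go(t): split at the first '\\' (t.find('\\'); none ↔ -1), bulk-convert the literal run
def goB (t : List Char) : List (List Char) :=
  match h : t.findIdx? (fun c => c == '\\') with
  | none => t.map fB
  | some p =>
      (t.take p).map fB
        ++ [(match t[p + 2]?, t[p + 3]? with
             | some a, some b => [a, b]
             | _, _ => [])]   -- Python raises IndexError here; such inputs are outside Pre_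
        ++ goB (t.drop (p + 4))
termination_by t.length
decreasing_by
  have := findIdx?_some_lt (fun c => c == '\\') t p h
  simp; omega

def bytestring2octstring_alt (bytestring : String) : String :=
  -- ''.join(parts) = concatenation — exact
  String.ofList (PySem.Chars.upper
    ('\'' :: (goB (bytestring.toList.dropWhile (fun c => c == 'b'))).flatten) ++ ['\'', 'O'])

-- ===== PRECONDITION & SPEC =====
-- Pre_ excludes strings in which, after stripping the leading 'b's, a backslash occurs within the
-- last three positions: when A's scan reaches such a backslash it raises IndexError; in the rare
-- case where an earlier escape group swallows that backslash A still returns, and B returns the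
-- same value there (the exclusion is only slightly wider than the crash set).
def Pre_bytestring2octstring (bytestring : String) : Prop :=
  let l := bytestring.toList.dropWhile (fun c => c == 'b')
  ∀ p ∈ List.range l.length, l.getD p ' ' = '\\' → p + 3 < l.length

instance (bytestring : String) : Decidable (Pre_bytestring2octstring bytestring) := by
  unfold Pre_bytestring2octstring; infer_instance

def pvWitness_bytestring2octstring : String := "b\\x41"

def Spec_bytestring2octstring (bytestring : String) (out : String) : Prop :=
  out = bytestring2octstring_alt bytestring
instance (bytestring : String) (out : String) : Decidable (Spec_bytestring2octstring bytestring out) := by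
  unfold Spec_bytestring2octstring; infer_instance

-- ===== CLAIM (what is proved, stated in full; the proofs are below) =====
def Claim_equal_bytestring2octstring : Prop :=
  ∀ (bytestring : String), Dom_bytestring2octstring bytestring →
    Pre_bytestring2octstring bytestring →
    Spec_bytestring2octstring bytestring (bytestring2octstring bytestring)

-- ===== LEMMAS AND PROOFS =====

-- the most significant hex digit of a positive number is neither '0' nor 'x'
theorem hexRev_last (n : Nat) (hn : 1 ≤ n) :
    ∃ d t, hexRev n = t ++ [d] ∧ ((d == '0' || d == 'x') = false) := by
  induction n using Nat.strong_induction_on with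
  | _ n ih =>
    rw [hexRev]
    have hn0 : n ≠ 0 := by omega
    simp only [hn0, if_false]
    by_cases h16 : n / 16 = 0
    · refine ⟨hexCharL (n % 16), [], by simp [hexRev, h16], ?_⟩
      have hm : n % 16 = n := Nat.mod_eq_of_lt (by omega)
      have h1 : 1 ≤ n % 16 := by omega
      have h2 : n % 16 < 16 := Nat.mod_lt _ (by norm_num)
      have hall : ∀ m, m < 16 → 1 ≤ m → ((hexCharL m == '0' || hexCharL m == 'x') = false) := by decide
      exact hall _ h2 h1
    · obtain ⟨d, t, ht, hd⟩ := ih (n / 16)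
        (Nat.div_lt_self (by omega) (by norm_num)) (by omega)
      exact ⟨d, hexCharL (n % 16) :: t, by rw [ht, List.cons_append], hd⟩

-- on the domain (no NUL char) A's hex/lstrip equals B's format(…, 'x')
theorem eA_eq_fB (c : Char) (hc : pvDomChar c = true) : eA c = fB c := by
  have hpos : 1 ≤ c.toNat := by
    simp [pvDomChar] at hc
    omega
  obtain ⟨d, t, ht, hd⟩ := hexRev_last c.toNat hpos
  have hne : c.toNat ≠ 0 := by omega
  simp only [eA, pyHex, fB, hne, if_false]
  rw [ht]
  have hrev : (t ++ [d]).reverse = d :: t.reverse := by simp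
  rw [hrev]
  simp only [List.dropWhile_cons, hd]
  norm_num

theorem goB_nil : goB [] = [] := by rw [goB]; simp

theorem goB_cons_not (c : Char) (t : List Char) (hc : (c == '\\') = false) :
    goB (c :: t) = fB c :: goB t := by
  rw [goB, goB, List.findIdx?_cons, hc, if_neg (show ¬(false = true) by decide)]
  cases h : List.findIdx? (fun c => c == '\\') t with
  | none =>
      rw [Option.map_none]
      simp
  | some p =>
      rw [Option.map_some]
      have e2 : (c :: t)[p + 1 + 2]? = t[p + 2]? := by
        have e : p + 1 + 2 = (p + 2) + 1 := by omega
        rw [e, List.getElem?_cons_succ]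
      have e3 : (c :: t)[p + 1 + 3]? = t[p + 3]? := by
        have e : p + 1 + 3 = (p + 3) + 1 := by omega
        rw [e, List.getElem?_cons_succ]
      have e4 : (c :: t).drop (p + 1 + 4) = t.drop (p + 4) := by
        have e : p + 1 + 4 = (p + 4) + 1 := by omega
        rw [e, List.drop_succ_cons]
      simp [e2, e3, e4, List.take_succ_cons]

theorem goB_cons_slash (t : List Char) :
    goB ('\\' :: t) =
      [(match t[1]?, t[2]? with
        | some a, some b => [a, b]
        | _, _ => [])] ++ goB (t.drop 3) := by
  rw [goB]
  rw [List.findIdx?_cons]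
  simp

-- the loops agree: A's scan from position `index` produces the concatenation of B's pieces on the suffix
theorem loopA_eq (l : List Char)
    (hdom : ∀ c ∈ l, pvDomChar c = true)
    (hpre : ∀ p, p < l.length → l.getD p ' ' = '\\' → p + 3 < l.length) :
    ∀ n index acc, l.length - index ≤ n →
      loopA l index acc = acc ++ (goB (l.drop index)).flatten := by
  intro n
  induction n with
  | zero =>
      intro index acc hle
      have hge : l.length ≤ index := by omega
      rw [loopA]
      simp only [dif_neg (by omega : ¬ index < l.length)]
      rw [List.drop_eq_nil_of_le hge, goB_nil]
      simp
  | succ n ih =>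
      intro index acc hle
      by_cases hidx : index < l.length
      · have hdrop : l.drop index = l[index] :: l.drop (index + 1) :=
          List.drop_eq_getElem_cons hidx
        rw [loopA]
        simp only [dif_pos hidx]
        by_cases hc : (l[index] == '\\') = true
        · have hsl : l[index] = '\\' := by simpa using hc
          have hp3 : index + 3 < l.length := by
            apply hpre index hidx
            rw [List.getD_eq_getElem?_getD, List.getElem?_eq_getElem hidx]
            simpa using hsl
          have hget2 : l[index + 2]? = some l[index + 2] :=
            List.getElem?_eq_getElem (by omega)
          have hget3 : l[index + 3]? = some l[index + 3] :=
            List.getElem?_eq_getElem (by omega)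
          simp only [hc, if_pos, hget2, hget3]
          rw [ih (index + 4) (acc ++ [l[index + 2], l[index + 3]]) (by omega)]
          rw [hdrop, hsl, goB_cons_slash]
          have e1 : (l.drop (index + 1))[1]? = l[index + 2]? := by
            rw [List.getElem?_drop]
          have e2 : (l.drop (index + 1))[2]? = l[index + 3]? := by
            rw [List.getElem?_drop]
          have e3 : (l.drop (index + 1)).drop 3 = l.drop (index + 4) := by
            rw [List.drop_drop]
          rw [e1, e2, e3, hget2, hget3]
          simp
        · have hcf : (l[index] == '\\') = false := by simpa using hc
          simp only [hcf, Bool.false_eq_true]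
          rw [ih (index + 1) (acc ++ eA l[index]) (by omega)]
          rw [hdrop, goB_cons_not _ _ hcf]
          rw [eA_eq_fB _ (hdom _ (l.getElem_mem hidx))]
          simp
      · rw [loopA]
        simp only [dif_neg hidx]
        rw [List.drop_eq_nil_of_le (by omega), goB_nil]
        simp

-- ===== VERDICT (by name: the statement is the Claim_ definition above) =====
theorem bytestring2octstring_spec : Claim_equal_bytestring2octstring := by
  intro s hdom hpre
  unfold Spec_bytestring2octstring bytestring2octstring bytestring2octstring_alt
  have hdoml : ∀ c ∈ s.toList.dropWhile (fun c => c == 'b'), pvDomChar c = true := by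
    intro c hcmem
    have hsub : c ∈ s.toList := (List.dropWhile_sublist _).subset hcmem
    have hdom' : s.toList.all pvDomChar = true := hdom
    exact List.all_eq_true.mp hdom' c hsub
  have hprel := hpre
  unfold Pre_bytestring2octstring at hprel
  simp only [List.mem_range] at hprel
  rw [loopA_eq (s.toList.dropWhile (fun c => c == 'b')) hdoml hprel
      (s.toList.dropWhile (fun c => c == 'b')).length 0 [] (by omega)]
  simp
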